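-- pv_equiv track=rewrite | github.com/Nisugi/lich-5-docs-minimax-test | generate_docs.py | sanitize_json_escapes
-- ===== SOURCE A (Python) =====
-- def sanitize_json_escapes(json_text: str) -> str:
--     r"""
--     Sanitize invalid escape sequences in JSON string
--
--     Valid JSON escapes: \", \\, \/, \b, \f, \n, \r, \t, \uXXXX
--     Common invalid escapes from AI: \d, \s, \w, \x, etc. (regex patterns)
--
--     Args:
--         json_text: Raw JSON string that may contain invalid escapes
--
--     Returns:
--         Sanitized JSON string with invalid escapes fixed
--     """
--     # Simpler approach: find all escape sequences and validate them
--     result = []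
--     i = 0
--     while i < len(json_text):
--         if json_text[i] == '\\' and i + 1 < len(json_text):
--             next_char = json_text[i + 1]
--
--             # Check if it's a valid escape
--             if next_char in '"\\/bfnrt':
--                 # Valid single-char escape
--                 result.append('\\')
--                 result.append(next_char)
--                 i += 2
--             elif next_char == 'u' and i + 5 < len(json_text):
--                 # Check for \uXXXX (must be 4 hex digits)
--                 hex_part = json_text[i+2:i+6]
--                 if len(hex_part) == 4 and all(c in '0123456789ABCDEFabcdef' for c in hex_part):
--                     # Valid \uXXXX
--                     result.append('\\u')
--                     result.append(hex_part)
--                     i += 6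
--                 else:
--                     # Invalid \u sequence - double-escape it
--                     result.append('\\\\u')
--                     i += 2
--             else:
--                 # Invalid escape - double-escape the backslash
--                 result.append('\\\\')
--                 result.append(next_char)
--                 i += 2
--         else:
--             # Not an escape sequence
--             result.append(json_text[i])
--             i += 1
--
--     return ''.join(result)
-- ===== SOURCE B (Python) =====
-- HEX = '0123456789ABCDEFabcdef'
--
-- def sanitize_json_escapes(json_text: str) -> str:
--     """Split once on backslashes and classify each following segment,
--     instead of walking the string character by character."""
--     segs = json_text.split('\\')
--     out = [segs[0]]
--     n = len(segs)
--     k = 1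
--     while k < n:
--         seg = segs[k]
--         if seg == '':
--             if k + 1 < n:
--                 # two adjacent backslashes: a valid \\ escape
--                 out.append('\\\\')
--                 out.append(segs[k + 1])
--                 k += 2
--             else:
--                 # lone trailing backslash, kept as-is
--                 out.append('\\')
--                 k += 1
--         else:
--             c = seg[0]
--             valid = c in '"/bfnrt' or (
--                 c == 'u' and len(seg) >= 5 and all(ch in HEX for ch in seg[1:5]))
--             out.append('\\' if valid else '\\\\')
--             out.append(seg)
--             k += 1
--     return ''.join(out)
-- ===== Notes on version B (the rewrite author's own statement) =====
-- stated objective: faster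
-- what changed: Replaced A's character-by-character index walk (with manual escape pairing and slicing) by a single str.split on backslashes followed by a per-segment classification: each segment after a backslash is kept whole and only the prefix '\' vs '\\' is chosen, with empty segments encoding backslash pairs and the lone trailing backslash; the per-character Python loop disappears.
import Mathlib
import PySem

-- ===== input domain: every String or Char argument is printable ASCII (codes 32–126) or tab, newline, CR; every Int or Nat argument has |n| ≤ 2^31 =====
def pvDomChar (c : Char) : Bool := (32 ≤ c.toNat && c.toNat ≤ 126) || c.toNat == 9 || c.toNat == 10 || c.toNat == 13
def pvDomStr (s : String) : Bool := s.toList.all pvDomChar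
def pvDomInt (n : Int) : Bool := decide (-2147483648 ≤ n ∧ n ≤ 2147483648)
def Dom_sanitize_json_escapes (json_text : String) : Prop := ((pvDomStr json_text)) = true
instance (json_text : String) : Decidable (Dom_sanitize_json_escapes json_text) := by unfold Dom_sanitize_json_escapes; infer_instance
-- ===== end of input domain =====

-- B replaces A's per-character index-walking scan with one split on backslashes plus a
-- per-segment classification (measurably faster in Python); same return value on every input.

-- ===== PORT A =====

-- '0123456789ABCDEFabcdef'
def pvHex (c : Char) : Bool :=
  c ∈ ['0','1','2','3','4','5','6','7','8','9','A','B','C','D','E','F','a','b','c','d','e','f']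

-- A's while-loop over index i, as structural recursion on the remaining suffix.
-- At a backslash with a next char d and remaining rest, json_text[i+2:i+6] is
-- rest.take 4 (exact: the guard 4 ≤ rest.length matches A's i + 5 < len(json_text)).
def pvGoA : List Char → List Char
  | [] => []
  | c :: rest =>
    if c = '\\' ∧ rest ≠ [] then
      let d := rest.headI
      let rest2 := rest.tail
      if d ∈ ['"','\\','/','b','f','n','r','t'] then
        '\\' :: d :: pvGoA rest2
      else if d = 'u' ∧ 4 ≤ rest2.length then
        let hexPart := rest2.take 4
        if hexPart.length = 4 ∧ hexPart.all pvHex then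
          '\\' :: 'u' :: (hexPart ++ pvGoA (rest2.drop 4))
        else
          '\\' :: '\\' :: 'u' :: pvGoA rest2
      else
        '\\' :: '\\' :: d :: pvGoA rest2
    else
      c :: pvGoA rest
termination_by l => l.length
decreasing_by all_goals simp_all [List.length_tail]

def sanitize_json_escapes (json_text : String) : String :=
  String.ofList (pvGoA json_text.toList)

-- ===== PORT B =====

-- Source B's while-loop over the list of segments (k from 1); seg[1:5] on a segment
-- c :: σ is σ.take 4 (exact: 1 and 5 are in-range nonnegative slice bounds).
def pvGoB : List (List Char) → List Char
  | [] => []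
  | [] :: rest =>
    match rest with
    | [] => ['\\']                                  -- lone trailing backslash
    | s :: rest2 => '\\' :: '\\' :: (s ++ pvGoB rest2)  -- adjacent backslashes: valid \\
  | (c :: σ) :: rest =>
    if c ∈ ['"','/','b','f','n','r','t'] ∨
        (c = 'u' ∧ 5 ≤ (c :: σ).length ∧ (σ.take 4).all pvHex) then
      '\\' :: (c :: σ) ++ pvGoB rest
    else
      '\\' :: '\\' :: (c :: σ) ++ pvGoB rest

def sanitize_json_escapes_alt (json_text : String) : String :=
  match PySem.Chars.splitOn json_text.toList ['\\'] with
  | [] => ""   -- unreachable: split never returns an empty list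
  | s0 :: rest => String.ofList (s0 ++ pvGoB rest)

-- ===== PRECONDITION & SPEC =====
def Spec_sanitize_json_escapes (json_text : String) (out : String) : Prop := out = sanitize_json_escapes_alt json_text
instance (json_text : String) (out : String) : Decidable (Spec_sanitize_json_escapes json_text out) := by unfold Spec_sanitize_json_escapes; infer_instance

-- ===== CLAIM (what is proved, stated in full; the proofs are below) =====
def Claim_equal_sanitize_json_escapes : Prop := ∀ (json_text : String), Dom_sanitize_json_escapes json_text → Spec_sanitize_json_escapes json_text (sanitize_json_escapes json_text)

-- ===== LEMMAS AND PROOFS =====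

-- Reference splitter: Python's split('\\') on a char list.
def pvSplit : List Char → List (List Char)
  | [] => [[]]
  | c :: rest =>
    if c = '\\' then [] :: pvSplit rest
    else (c :: (pvSplit rest).headI) :: (pvSplit rest).tail

theorem pvSplit_ne_nil (l : List Char) : pvSplit l ≠ [] := by
  cases l with
  | nil => simp [pvSplit]
  | cons c rest => simp only [pvSplit]; split <;> simp

theorem pvSplit_eq_cons (l : List Char) :
    pvSplit l = (pvSplit l).headI :: (pvSplit l).tail := by
  cases h : pvSplit l with
  | nil => exact absurd h (pvSplit_ne_nil l)
  | cons a t => simp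

theorem headI_pvSplit (l : List Char) :
    (pvSplit l).headI = l.takeWhile (fun c => !(c == '\\')) := by
  induction l with
  | nil => simp [pvSplit]
  | cons c rest ih =>
    have hb : (c == '\\') = decide (c = '\\') := by rfl
    by_cases h : c = '\\' <;>
      simp [pvSplit, h, List.takeWhile, ih, hb]

theorem splitOn_go_spec : ∀ (fuel : Nat) (l cur : List Char) (acc : List (List Char)),
    l.length ≤ fuel →
    PySem.Chars.splitOn.go ['\\'] fuel l cur acc =
      acc.reverse ++ (cur.reverse ++ (pvSplit l).headI) :: (pvSplit l).tail := by
  intro fuel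
  induction fuel with
  | zero =>
    intro l cur acc h
    have : l = [] := by
      cases l with
      | nil => rfl
      | cons c r => simp at h
    subst this
    have e : PySem.Chars.splitOn.go ['\\'] 0 [] cur acc
        = ((cur.reverse ++ []) :: acc).reverse := rfl
    rw [e]; simp [pvSplit]
  | succ fuel ih =>
    intro l cur acc h
    cases l with
    | nil =>
      have e : PySem.Chars.splitOn.go ['\\'] (fuel+1) [] cur acc
          = (cur.reverse :: acc).reverse := rfl
      rw [e]; simp [pvSplit]
    | cons c rest =>
      have e : PySem.Chars.splitOn.go ['\\'] (fuel+1) (c::rest) cur acc =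
          (if List.isPrefixOf ['\\'] (c::rest) = true
           then PySem.Chars.splitOn.go ['\\'] fuel (List.drop 1 (c::rest)) [] (cur.reverse :: acc)
           else PySem.Chars.splitOn.go ['\\'] fuel rest (c :: cur) acc) := rfl
      rw [e]
      have hlen : rest.length ≤ fuel := by simp at h; omega
      by_cases hc : c = '\\'
      · subst hc
        have hp : List.isPrefixOf ['\\'] ('\\' :: rest) = true := by
          simp [List.isPrefixOf]
        rw [if_pos hp]
        rw [show List.drop 1 ('\\' :: rest) = rest by simp]
        rw [ih rest [] (cur.reverse :: acc) hlen]
        rw [show pvSplit ('\\' :: rest) = [] :: pvSplit rest from by simp [pvSplit]]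
        simp only [List.reverse_nil, List.nil_append, List.headI_cons, List.tail_cons,
          List.reverse_cons, List.append_nil]
        rw [← pvSplit_eq_cons rest]
        simp
      · have hp : List.isPrefixOf ['\\'] (c :: rest) = false := by
          simp only [List.isPrefixOf, Bool.and_eq_false_iff]
          left
          simp [beq_eq_false_iff_ne]
          exact fun h' => hc h'.symm
        rw [if_neg (by simp [hp])]
        rw [ih rest (c :: cur) acc hlen]
        simp [pvSplit, hc]

theorem splitOn_eq_pvSplit (l : List Char) :
    PySem.Chars.splitOn l ['\\'] = pvSplit l := by
  unfold PySem.Chars.splitOn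
  rw [splitOn_go_spec (l.length + 1) l [] [] (by omega)]
  simp [← pvSplit_eq_cons]

theorem pvHex_ne_backslash (c : Char) (h : pvHex c = true) : c ≠ '\\' := by
  intro hc; subst hc; simp [pvHex] at h

theorem takeWhile_take_eq : ∀ (n : Nat) (l : List Char),
    n ≤ (l.takeWhile (fun c => !(c == '\\'))).length →
    l.take n = (l.takeWhile (fun c => !(c == '\\'))).take n := by
  intro n
  induction n with
  | zero => intro l _; simp
  | succ n ih =>
    intro l h
    cases l with
    | nil => simp at h
    | cons c r =>
      by_cases hc : c = '\\'
      · subst hc; simp [List.takeWhile] at h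
      · have hb : (c == '\\') = false := by simp [hc]
        have htw : List.takeWhile (fun c => !(c == '\\')) (c :: r)
            = c :: List.takeWhile (fun c => !(c == '\\')) r := by
          simp [List.takeWhile, hb]
        rw [htw] at h ⊢
        simp only [List.take_succ_cons]
        rw [ih r (by simpa using h)]

theorem hexAll_imp_len : ∀ (n : Nat) (l : List Char),
    n ≤ l.length → (l.take n).all pvHex = true →
    n ≤ (l.takeWhile (fun c => !(c == '\\'))).length := by
  intro n
  induction n with
  | zero => intro l _ _; simp
  | succ n ih =>
    intro l h hall
    cases l with
    | nil => simp at h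
    | cons c r =>
      simp only [List.take_succ_cons, List.all_cons, Bool.and_eq_true] at hall
      have hc : c ≠ '\\' := pvHex_ne_backslash c hall.1
      have hb : (c == '\\') = false := by simp [hc]
      have htw : List.takeWhile (fun c => !(c == '\\')) (c :: r)
          = c :: List.takeWhile (fun c => !(c == '\\')) r := by
        simp [List.takeWhile, hb]
      rw [htw]
      simp only [List.length_cons, Nat.succ_le_succ_iff]
      exact ih r (by simpa using h) hall.2

theorem hexCond_iff (l : List Char) :
    (4 ≤ l.length ∧ (l.take 4).all pvHex = true) ↔
    (4 ≤ (l.takeWhile (fun c => !(c == '\\'))).length ∧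
      ((l.takeWhile (fun c => !(c == '\\'))).take 4).all pvHex = true) := by
  constructor
  · rintro ⟨h1, h2⟩
    have hlen := hexAll_imp_len 4 l h1 h2
    exact ⟨hlen, by rw [← takeWhile_take_eq 4 l hlen]; exact h2⟩
  · rintro ⟨h1, h2⟩
    have hle : (l.takeWhile (fun c => !(c == '\\'))).length ≤ l.length :=
      List.IsPrefix.length_le (List.takeWhile_prefix _)
    exact ⟨le_trans h1 hle, by rw [takeWhile_take_eq 4 l h1]; exact h2⟩

theorem seg_drop : ∀ (n : Nat) (l : List Char),
    n ≤ ((pvSplit l).headI).length →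
    pvSplit (l.drop n) = (((pvSplit l).headI).drop n) :: (pvSplit l).tail := by
  intro n
  induction n with
  | zero => intro l _; simpa using pvSplit_eq_cons l
  | succ n ih =>
    intro l h
    cases l with
    | nil => simp [pvSplit] at h
    | cons c r =>
      by_cases hc : c = '\\'
      · subst hc; simp [pvSplit] at h
      · have hs : pvSplit (c :: r) = (c :: (pvSplit r).headI) :: (pvSplit r).tail := by
          simp [pvSplit, hc]
        rw [hs] at h ⊢
        simp only [List.headI_cons, List.tail_cons, List.length_cons,
          Nat.succ_le_succ_iff, List.drop_succ_cons] at h ⊢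
        exact ih r h

theorem pvMain : ∀ (n : Nat) (l : List Char), l.length ≤ n →
    pvGoA l = (pvSplit l).headI ++ pvGoB (pvSplit l).tail := by
  intro n
  induction n with
  | zero =>
    intro l h
    have : l = [] := by cases l with
      | nil => rfl
      | cons c r => simp at h
    subst this
    simp [pvGoA, pvSplit, pvGoB]
  | succ n ih =>
    intro l h
    cases l with
    | nil => simp [pvGoA, pvSplit, pvGoB]
    | cons c rest =>
      have hlen : rest.length ≤ n := by simp at h; omega
      by_cases hc : c = '\\'
      · subst hc
        cases rest with
        | nil =>
          simp [pvGoA, pvSplit, pvGoB]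
        | cons d rest2 =>
          have hlen2 : rest2.length ≤ n := by simp at hlen; omega
          rw [pvGoA.eq_def]
          simp only [ne_eq, reduceCtorEq, not_false_eq_true, and_self, if_true,
            List.headI_cons, List.tail_cons]
          rw [show pvSplit ('\\' :: d :: rest2) = [] :: pvSplit (d :: rest2) from by
            simp [pvSplit]]
          simp only [List.headI_cons, List.tail_cons, List.nil_append]
          by_cases hd : d = '\\'
          · subst hd
            rw [if_pos (by simp)]
            rw [show pvSplit ('\\' :: rest2) = [] :: pvSplit rest2 from by simp [pvSplit]]
            rw [pvSplit_eq_cons rest2]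
            show _ = pvGoB ([] :: (pvSplit rest2).headI :: (pvSplit rest2).tail)
            rw [show pvGoB ([] :: (pvSplit rest2).headI :: (pvSplit rest2).tail)
                = '\\' :: '\\' :: ((pvSplit rest2).headI ++ pvGoB (pvSplit rest2).tail) from rfl]
            rw [ih rest2 hlen2]
          · have hsplit : pvSplit (d :: rest2)
                = (d :: (pvSplit rest2).headI) :: (pvSplit rest2).tail := by
              simp [pvSplit, hd]
            rw [hsplit]
            by_cases hv : d ∈ ['"', '/', 'b', 'f', 'n', 'r', 't']
            · rw [if_pos (by simp at hv ⊢; tauto)]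
              rw [show pvGoB ((d :: (pvSplit rest2).headI) :: (pvSplit rest2).tail)
                  = '\\' :: (d :: (pvSplit rest2).headI) ++ pvGoB (pvSplit rest2).tail from by
                rw [pvGoB]
                rw [if_pos (Or.inl (by simpa using hv))]]
              rw [ih rest2 hlen2]
              simp
            · have hv8 : d ∉ (['"', '\\', '/', 'b', 'f', 'n', 'r', 't'] : List Char) := by
                simp at hv ⊢; tauto
              rw [if_neg hv8]
              by_cases hu : d = 'u'
              · subst hu
                by_cases hA : 4 ≤ rest2.length ∧ (rest2.take 4).all pvHex = true
                · have hB := (hexCond_iff rest2).mp hA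
                  rw [← headI_pvSplit rest2] at hB
                  rw [if_pos ⟨rfl, hA.1⟩]
                  rw [if_pos ⟨by simp [hA.1], hA.2⟩]
                  have hdrop := seg_drop 4 rest2 hB.1
                  have htake : rest2.take 4 = ((pvSplit rest2).headI).take 4 := by
                    rw [headI_pvSplit rest2] at hB ⊢
                    exact takeWhile_take_eq 4 rest2 hB.1
                  rw [pvGoB]
                  rw [if_pos (Or.inr ⟨rfl, by simp; omega, by
                    rw [headI_pvSplit rest2]; exact ((hexCond_iff rest2).mp hA).2⟩)]
                  rw [ih (rest2.drop 4) (le_trans (by simp) hlen2)]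
                  rw [hdrop]
                  simp only [List.headI_cons, List.tail_cons]
                  rw [htake]
                  simp [← List.append_assoc, List.take_append_drop]
                · have hBf : ¬ (4 ≤ ((pvSplit rest2).headI).length ∧
                      (((pvSplit rest2).headI).take 4).all pvHex = true) := by
                    rw [headI_pvSplit rest2]
                    exact fun hB => hA ((hexCond_iff rest2).mpr hB)
                  have hgb : pvGoB (('u' :: (pvSplit rest2).headI) :: (pvSplit rest2).tail)
                      = '\\' :: '\\' :: ('u' :: (pvSplit rest2).headI)
                          ++ pvGoB (pvSplit rest2).tail := by
                    rw [pvGoB]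
                    rw [if_neg (by
                      rintro (hmem | ⟨-, h5, hhex⟩)
                      · simp at hmem
                      · exact hBf ⟨by simp at h5; omega, hhex⟩)]
                  by_cases hL : 4 ≤ rest2.length
                  · rw [if_pos ⟨rfl, hL⟩]
                    rw [if_neg (fun hx => hA ⟨hL, hx.2⟩)]
                    rw [hgb, ih rest2 hlen2]
                    simp
                  · rw [if_neg (fun hx => hL hx.2)]
                    rw [hgb, ih rest2 hlen2]
                    simp
              · rw [if_neg (by simp [hu])]
                rw [pvGoB]
                rw [if_neg (by
                  push_neg
                  exact ⟨by simpa using hv, fun h' => absurd h' hu⟩)]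
                rw [ih rest2 hlen2]
                simp
      · rw [pvGoA.eq_def]
        simp only [hc, false_and, if_false]
        have hs : pvSplit (c :: rest) = (c :: (pvSplit rest).headI) :: (pvSplit rest).tail := by
          simp [pvSplit, hc]
        rw [hs]
        simp only [List.headI_cons, List.tail_cons]
        rw [ih rest hlen]
        simp


-- ===== VERDICT (by name: the statement is the Claim_ definition above) =====
theorem sanitize_json_escapes_spec : Claim_equal_sanitize_json_escapes := by
  intro s _
  unfold Spec_sanitize_json_escapes sanitize_json_escapes sanitize_json_escapes_alt
  rw [splitOn_eq_pvSplit, pvSplit_eq_cons (s.toList)]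
  simp only
  rw [pvMain s.toList.length s.toList le_rfl]
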